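-- pv_equiv track=rewrite | github.com/yinyajun/xtrain | sft_study/scripts/debug/inspect_model.py | _find_mask_spans
-- ===== SOURCE A (Python) =====
-- def _find_mask_spans(mask: list[int]) -> list[tuple[int, int]]:
--     spans: list[tuple[int, int]] = []
--     start = None
--     for idx, value in enumerate(mask):
--         if value and start is None:
--             start = idx
--         elif not value and start is not None:
--             spans.append((start, idx - 1))
--             start = None
--     if start is not None:
--         spans.append((start, len(mask) - 1))
--     return spans
-- ===== SOURCE B (Python) =====
-- def _find_mask_spans(mask: list[int]) -> list[tuple[int, int]]:
--     spans: list[tuple[int, int]] = []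
--     i = 0
--     n = len(mask)
--     while i < n:
--         truthy = bool(mask[i])
--         j = i + 1
--         while j < n and bool(mask[j]) == truthy:
--             j += 1
--         if truthy:
--             spans.append((i, j - 1))
--         i = j
--     return spans
-- ===== Notes on version B (the rewrite author's own statement) =====
-- stated objective: alternative
-- what changed: Replaced the start-sentinel state machine over enumerate with a run-length scanner: an outer loop locates each maximal run of equal truthiness with an inner scan and derives span bounds arithmetically from the run endpoints.
import Mathlib
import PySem

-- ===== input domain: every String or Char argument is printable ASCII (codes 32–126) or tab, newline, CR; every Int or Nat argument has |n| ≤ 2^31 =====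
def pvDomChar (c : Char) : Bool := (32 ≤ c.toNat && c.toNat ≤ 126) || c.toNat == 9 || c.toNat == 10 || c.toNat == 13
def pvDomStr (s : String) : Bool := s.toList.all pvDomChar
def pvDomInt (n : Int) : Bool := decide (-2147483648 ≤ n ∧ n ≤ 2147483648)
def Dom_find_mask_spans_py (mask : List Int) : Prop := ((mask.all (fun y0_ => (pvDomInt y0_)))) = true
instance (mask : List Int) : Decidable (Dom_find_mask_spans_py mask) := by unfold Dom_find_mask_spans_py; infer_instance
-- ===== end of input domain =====

-- B replaces A's start-sentinel state machine with a run-length scanner over maximal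
-- runs of equal truthiness (objective: alternative decomposition, same cost).

-- ===== PORT A =====
-- A's for-loop: state (spans, start); idx is the enumerate index; int truthiness is v ≠ 0
def loopA : List Int → Int → List (Int × Int) → Option Int → List (Int × Int) × Option Int
  | [], _, spans, start => (spans, start)
  | v :: rest, idx, spans, start =>
    match start with
    | none => if v ≠ 0 then loopA rest (idx + 1) spans (some idx)
              else loopA rest (idx + 1) spans none
    | some s => if v = 0 then loopA rest (idx + 1) (spans ++ [(s, idx - 1)]) none
                else loopA rest (idx + 1) spans (some s)

def find_mask_spans_py (mask : List Int) : List (Int × Int) :=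
  match loopA mask 0 [] none with
  | (spans, none) => spans
  | (spans, some s) => spans ++ [(s, (mask.length : Int) - 1)]

-- ===== PORT B =====
-- B's outer while-loop: i indexes the head of the remaining suffix; the inner
-- while-scan to the end of the current run is the takeWhile/dropWhile pair
def altLoop : List Int → Int → List (Int × Int) → List (Int × Int)
  | [], _, spans => spans
  | x :: xs, i, spans =>
    let b := decide (x ≠ 0)
    let j : Int := i + 1 + ((xs.takeWhile (fun y => decide (y ≠ 0) == b)).length : Int)
    altLoop (xs.dropWhile (fun y => decide (y ≠ 0) == b)) j
      (if b then spans ++ [(i, j - 1)] else spans)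
termination_by l => l.length
decreasing_by
  exact Nat.lt_succ_of_le (List.length_dropWhile_le _ _)

def find_mask_spans_py_alt (mask : List Int) : List (Int × Int) :=
  altLoop mask 0 []

-- ===== PRECONDITION & SPEC =====
def Spec_find_mask_spans_py (mask : List Int) (out : List (Int × Int)) : Prop := out = find_mask_spans_py_alt mask
instance (mask : List Int) (out : List (Int × Int)) : Decidable (Spec_find_mask_spans_py mask out) := by unfold Spec_find_mask_spans_py; infer_instance

-- ===== CLAIM (what is proved, stated in full; the proofs are below) =====
def Claim_equal_find_mask_spans_py : Prop := ∀ (mask : List Int), Dom_find_mask_spans_py mask → Spec_find_mask_spans_py mask (find_mask_spans_py mask)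

-- ===== LEMMAS AND PROOFS =====

def A_total (m : List Int) (idx : Int) (spans : List (Int × Int)) (start : Option Int) : List (Int × Int) :=
  match loopA m idx spans start with
  | (sp, none) => sp
  | (sp, some s) => sp ++ [(s, idx + (m.length : Int) - 1)]

theorem A_total_cons_none (v : Int) (xs : List Int) (idx : Int) (spans : List (Int × Int)) :
    A_total (v :: xs) idx spans none
      = if v ≠ 0 then A_total xs (idx + 1) spans (some idx)
        else A_total xs (idx + 1) spans none := by
  by_cases hv : v = 0
  · simp only [A_total, loopA, hv, if_neg, not_true, not_false_iff, ite_false, ite_true, ne_eq, decide_true]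
    rcases h : loopA xs (idx + 1) spans none with ⟨sp, st⟩
    cases st <;> simp [h]
    push_cast; ring_nf
  · simp only [A_total, loopA, hv, not_false_iff, ite_true, ne_eq, ite_false]
    rcases h : loopA xs (idx + 1) spans (some idx) with ⟨sp, st⟩
    cases st <;> simp [h]
    push_cast; ring_nf
theorem A_total_cons_some (v : Int) (xs : List Int) (idx : Int) (spans : List (Int × Int)) (s : Int) :
    A_total (v :: xs) idx spans (some s)
      = if v = 0 then A_total xs (idx + 1) (spans ++ [(s, idx - 1)]) none
        else A_total xs (idx + 1) spans (some s) := by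
  by_cases hv : v = 0
  · simp only [A_total, loopA, hv, if_pos]
    rcases h : loopA xs (idx + 1) (spans ++ [(s, idx - 1)]) none with ⟨sp, st⟩
    cases st <;> simp [h]
    push_cast; ring_nf
  · simp only [A_total, loopA, hv, if_neg, not_false_iff]
    rcases h : loopA xs (idx + 1) spans (some s) with ⟨sp, st⟩
    cases st <;> simp [h]
    push_cast; ring_nf

def runsB : List Int → List (Bool × Nat)
  | [] => []
  | x :: xs =>
    let b := decide (x ≠ 0)
    (b, (xs.takeWhile (fun y => decide (y ≠ 0) == b)).length + 1)
      :: runsB (xs.dropWhile (fun y => decide (y ≠ 0) == b))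
termination_by l => l.length
decreasing_by
  exact Nat.lt_succ_of_le (List.length_dropWhile_le _ _)

def mergeCons (b : Bool) : List (Bool × Nat) → List (Bool × Nat)
  | [] => [(b, 1)]
  | (b', n) :: rs => if b = b' then (b', n + 1) :: rs else (b, 1) :: (b', n) :: rs

theorem runsB_cons (x : Int) (xs : List Int) :
    runsB (x :: xs) = mergeCons (decide (x ≠ 0)) (runsB xs) := by
  cases xs with
  | nil => simp [runsB, mergeCons]
  | cons y ys =>
    by_cases h : decide (y ≠ 0) = decide (x ≠ 0)
    · have htrue : (decide (y ≠ 0) == decide (x ≠ 0)) = true := by simp [h]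
      rw [runsB]
      simp only [List.takeWhile_cons, List.dropWhile_cons, htrue, if_pos]
      conv_rhs => rw [runsB, mergeCons]
      rw [if_pos h.symm, ← h]
      simp
    · have hfalse : (decide (y ≠ 0) == decide (x ≠ 0)) = false := by
        rw [beq_eq_false_iff_ne]; exact h
      rw [runsB]
      simp only [List.takeWhile_cons, List.dropWhile_cons, hfalse, Bool.false_eq_true,
        if_false, List.length_nil]
      conv_lhs => rw [runsB]
      conv_rhs => rw [runsB, mergeCons]
      rw [if_neg (fun hc => h hc.symm)]
def loopB : List (Bool × Nat) → Int → List (Int × Int) → List (Int × Int)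
  | [], _, spans => spans
  | (b, len) :: rs, off, spans =>
    loopB rs (off + (len : Int)) (if b then spans ++ [(off, off + (len : Int) - 1)] else spans)

def trueExtend (k : Nat) : List (Bool × Nat) → List (Bool × Nat)
  | [] => [(true, k)]
  | (true, n) :: rs => (true, n + k) :: rs
  | (false, n) :: rs => (true, k) :: (false, n) :: rs

theorem loopB_off (rs : List (Bool × Nat)) (a b : Int) (spans : List (Int × Int)) (h : a = b) :
    loopB rs a spans = loopB rs b spans := by rw [h]

theorem loopB_mergeCons_false (rs : List (Bool × Nat)) (off : Int) (spans : List (Int × Int)) :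
    loopB (mergeCons false rs) off spans = loopB rs (off + 1) spans := by
  match rs with
  | [] => simp [mergeCons, loopB]
  | (true, n) :: rs' => simp [mergeCons, loopB]
  | (false, n) :: rs' =>
    simp only [mergeCons, loopB, eq_self_iff_true, if_true, Bool.false_eq_true, if_false]
    exact loopB_off _ _ _ _ (by push_cast; ring)

theorem trueExtend_mergeCons_true (rs : List (Bool × Nat)) (k : Nat) :
    trueExtend k (mergeCons true rs) = trueExtend (k + 1) rs := by
  match rs with
  | [] => simp [mergeCons, trueExtend]; omega
  | (true, n) :: rs' => simp [mergeCons, trueExtend]; omega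
  | (false, n) :: rs' => simp [mergeCons, trueExtend]; omega

theorem mergeCons_true_eq (rs : List (Bool × Nat)) :
    mergeCons true rs = trueExtend 1 rs := by
  match rs with
  | [] => rfl
  | (true, n) :: rs' => simp [mergeCons, trueExtend]
  | (false, n) :: rs' => simp [mergeCons, trueExtend]

theorem loopB_trueExtend_mergeCons_false (rs : List (Bool × Nat)) (s : Int)
    (spans : List (Int × Int)) (k : Nat) :
    loopB (trueExtend k (mergeCons false rs)) s spans
      = loopB rs (s + k + 1) (spans ++ [(s, s + k - 1)]) := by
  match rs with
  | [] => simp [mergeCons, trueExtend, loopB]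
  | (true, n) :: rs' =>
    simp only [mergeCons, Bool.false_eq_true, if_false, trueExtend, loopB, ite_true,
      ite_false, Nat.cast_one]
  | (false, n) :: rs' =>
    simp only [mergeCons, eq_self_iff_true, if_true, trueExtend, loopB, ite_true,
      ite_false, Bool.false_eq_true]
    exact loopB_off _ _ _ _ (by push_cast; ring)
theorem agree (m : List Int) :
    (∀ idx spans, A_total m idx spans none = loopB (runsB m) idx spans)
    ∧ (∀ idx spans (s : Int) (k : Nat), idx = s + k →
        A_total m idx spans (some s) = loopB (trueExtend k (runsB m)) s spans) := by
  induction m with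
  | nil =>
    constructor
    · intro idx spans; simp [A_total, loopA, runsB, loopB]
    · intro idx spans s k hk
      simp only [A_total, loopA, runsB, trueExtend, loopB, List.length_nil, Nat.cast_zero]
      subst hk; ring_nf; simp
  | cons v xs ih =>
    obtain ⟨ihN, ihS⟩ := ih
    constructor
    · intro idx spans
      rw [A_total_cons_none, runsB_cons]
      by_cases hv : v = 0
      · rw [if_neg (by simpa using hv), hv]
        simp only [ne_eq, not_true_eq_false, decide_false]
        rw [ihN, loopB_mergeCons_false]
      · rw [if_pos hv]
        rw [ihS (idx + 1) spans idx 1 (by push_cast; ring)]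
        rw [decide_eq_true (by exact hv), mergeCons_true_eq]
    · intro idx spans s k hk
      rw [A_total_cons_some, runsB_cons]
      by_cases hv : v = 0
      · rw [if_pos hv, hv]
        simp only [ne_eq, not_true_eq_false, decide_false]
        rw [ihN, loopB_trueExtend_mergeCons_false]
        subst hk
        rw [show s + (k : Int) + 1 = s + k + 1 by ring]
      · rw [if_neg hv]
        rw [ihS (idx + 1) spans s (k + 1) (by subst hk; push_cast; ring)]
        rw [decide_eq_true (by exact hv), trueExtend_mergeCons_true]
theorem altLoop_eq_loopB (n : Nat) :
    ∀ (l : List Int), l.length ≤ n → ∀ (i : Int) (spans : List (Int × Int)),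
      altLoop l i spans = loopB (runsB l) i spans := by
  induction n with
  | zero =>
    intro l hl i spans
    rw [List.length_eq_zero_iff.mp (Nat.le_zero.mp hl)]
    simp [altLoop, runsB, loopB]
  | succ n ih =>
    intro l hl i spans
    match l with
    | [] => simp [altLoop, runsB, loopB]
    | x :: xs =>
      rw [altLoop, runsB, loopB]
      rw [ih _ (le_trans (List.length_dropWhile_le _ _) (Nat.le_of_succ_le_succ hl))]
      have h1 : i + 1 + ((List.takeWhile (fun y => decide (y ≠ 0) == decide (x ≠ 0)) xs).length : Int)
          = i + (((List.takeWhile (fun y => decide (y ≠ 0) == decide (x ≠ 0)) xs).length + 1 : Nat) : Int) := by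
        push_cast; ring
      rw [h1]

theorem find_mask_spans_eq_A_total (mask : List Int) :
    find_mask_spans_py mask = A_total mask 0 [] none := by
  simp only [find_mask_spans_py, A_total]
  rcases h : loopA mask 0 [] none with ⟨sp, st⟩
  cases st <;> simp

-- ===== VERDICT (by name: the statement is the Claim_ definition above) =====
theorem find_mask_spans_py_spec : Claim_equal_find_mask_spans_py := by
  intro mask _
  unfold Spec_find_mask_spans_py
  rw [find_mask_spans_eq_A_total, (agree mask).1]
  unfold find_mask_spans_py_alt
  rw [altLoop_eq_loopB mask.length mask le_rfl]
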